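-- pv_equiv track=rewrite | github.com/nealstewart/advent-of-code-2018 | 5/5.py | combine_with_one_removed
-- ===== SOURCE A (Python) =====
-- def are_combineable(a: str, b: str) -> bool:
--     return a.lower() == b.lower() and a != b
--
-- def combine_with_one_removed(target: str, type: str) -> str:
--     while True:
--         combined = ['']
--         for char in target:
--             if (char.lower() == type.lower()):
--                 continue
--             elif are_combineable(combined[-1], char):
--                 del combined[-1]
--             else:
--                 combined.append(char)
--
--         new_string = ''.join(combined)
--         if len(new_string) == len(target):
--             return target
--
--         target = new_string
-- ===== SOURCE B (Python) =====
-- def combine_with_one_removed(target: str, type: str) -> str: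
--     t = type.lower()
--     s = [c for c in target if c.lower() != t]
--     while True:
--         out = []
--         changed = False
--         i = 0
--         while i < len(s):
--             if i + 1 < len(s) and s[i] != s[i + 1] and s[i].lower() == s[i + 1].lower():
--                 i += 2
--                 changed = True
--             else:
--                 out.append(s[i])
--                 i += 1
--         if not changed:
--             return ''.join(s)
--         s = out
-- ===== Notes on version B (the rewrite author's own statement) =====
-- stated objective: alternative
-- what changed: A interleaves the case-insensitive unit removal with a sentinel-stack reduction inside every pass and repeats whole filter+stack passes until the length stops changing; B filters the unit out once, then repeatedly scans the list removing every non-overlapping adjacent reactive pair until a scan changes nothing.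
import Mathlib
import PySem

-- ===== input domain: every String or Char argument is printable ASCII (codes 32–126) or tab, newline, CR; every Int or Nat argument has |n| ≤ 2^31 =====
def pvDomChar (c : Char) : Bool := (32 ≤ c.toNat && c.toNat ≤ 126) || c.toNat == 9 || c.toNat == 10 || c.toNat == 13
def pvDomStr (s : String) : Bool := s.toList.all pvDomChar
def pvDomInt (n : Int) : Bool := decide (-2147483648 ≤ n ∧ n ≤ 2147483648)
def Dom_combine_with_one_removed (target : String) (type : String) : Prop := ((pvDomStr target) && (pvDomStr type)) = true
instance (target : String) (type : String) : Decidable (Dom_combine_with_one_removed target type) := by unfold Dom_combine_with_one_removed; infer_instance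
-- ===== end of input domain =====

-- B replaces A's repeated filter+stack passes with one case-insensitive filter followed by
-- repeated global adjacent-pair elimination scans until a fixpoint (alternative decomposition).

-- ===== PORT A =====

-- a single-character Python string
def pvSgl (c : Char) : String := String.ofList [c]

def are_combineable (a : String) (b : String) : Bool :=
  (PySem.Str.lower a == PySem.Str.lower b) && (a != b)

-- the body of A's `for char in target` loop.
-- `combined[-1]` is ported as pyGetD … (-1) "": `combined` is never empty there (it starts as
-- [""] and the "" sentinel is never combineable, so it is never deleted), hence the default
-- is never used; `del combined[-1]` on the nonempty list is `dropLast`.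
def pvAStep (type : String) (combined : List String) (char : Char) : List String :=
  if PySem.Str.lower (pvSgl char) == PySem.Str.lower type then combined
  else if are_combineable (PySem.List.pyGetD combined (-1) "") (pvSgl char) then combined.dropLast
  else combined ++ [pvSgl char]

-- one iteration of A's `while True` loop, up to `new_string = ''.join(combined)`
def pvPassA (target : String) (type : String) : String :=
  PySem.Str.join "" (List.foldl (pvAStep type) [""] target.toList)

-- needed by A's termination: one pass never lengthens the string
lemma pvPassA_len (target type : String) :
    (pvPassA target type).toList.length ≤ target.toList.length := by
  have hdrop : ∀ (xs : List String),
      ((xs.dropLast).map (fun s => s.toList.length)).sum ≤ (xs.map (fun s => s.toList.length)).sum := by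
    intro xs
    induction xs with
    | nil => simp
    | cons a t ih => cases t with
      | nil => simp
      | cons b u =>
        simp only [List.dropLast_cons₂, List.map_cons, List.sum_cons] at ih ⊢
        omega
  have hfold : ∀ (l : List Char) (acc : List String),
      ((List.foldl (pvAStep type) acc l).map (fun s => s.toList.length)).sum
        ≤ (acc.map (fun s => s.toList.length)).sum + l.length := by
    intro l
    induction l with
    | nil => intro acc; simp
    | cons c l ih =>
      intro acc
      have h2 := ih (pvAStep type acc c)
      have h3 : ((pvAStep type acc c).map (fun s => s.toList.length)).sum
          ≤ (acc.map (fun s => s.toList.length)).sum + 1 := by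
        unfold pvAStep
        split
        · omega
        · split
          · have := hdrop acc; omega
          · simp [pvSgl]
      simp only [List.foldl_cons, List.length_cons]
      omega
  have hjoin : ∀ (parts : List String),
      (PySem.Str.join "" parts).toList.length = (parts.map (fun s => s.toList.length)).sum := by
    intro parts
    rw [PySem.Str.toList_join]
    have : ∀ (L : List (List Char)), PySem.Chars.join [] L = L.flatten := by
      intro L
      induction L with
      | nil => rfl
      | cons h t ih => cases t <;> simp_all [PySem.Chars.join, List.intercalate, List.intersperse]
    simp only [String.toList_empty, this, List.length_flatten, List.map_map]
    rfl
  have h1 := hjoin (List.foldl (pvAStep type) [""] target.toList)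
  have h2 := hfold target.toList [""]
  unfold pvPassA
  simp only [List.map_cons, List.map_nil, List.sum_cons, List.sum_nil] at h1 h2 ⊢
  rw [h1]
  simpa using h2

def combine_with_one_removed (target : String) (type : String) : String :=
  let new_string := pvPassA target type
  if PySem.Str.len new_string == PySem.Str.len target then target
  else combine_with_one_removed new_string type
termination_by target.toList.length
decreasing_by
  have h := pvPassA_len target type
  simp only [new_string, PySem.Str.len, beq_iff_eq, Int.natCast_inj] at *
  omega


-- ===== PORT B =====

-- B's pair test `s[i] != s[i+1] and s[i].lower() == s[i+1].lower()` on two characters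
def pvComb (a b : Char) : Bool :=
  a != b && (PySem.Chars.lower [a] == PySem.Chars.lower [b])

-- B's inner `while i < len(s)` scan: returns (out, changed)
def pvPassB : List Char → List Char × Bool
  | [] => ([], false)
  | [c] => ([c], false)
  | a :: b :: rest =>
    if pvComb a b then ((pvPassB rest).1, true)
    else (a :: (pvPassB (b :: rest)).1, (pvPassB (b :: rest)).2)

-- needed by B's termination: a scan that removed a pair shortens the list
lemma pvPassB_lt (s : List Char) (h : (pvPassB s).2 = true) : ((pvPassB s).1).length < s.length := by
  have hle : ∀ (t : List Char), ((pvPassB t).1).length ≤ t.length := by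
    intro t
    induction t using pvPassB.induct with
    | case1 => simp [pvPassB]
    | case2 c => simp [pvPassB]
    | case3 a b rest hc ih => simp only [pvPassB, if_pos hc]; simp; omega
    | case4 a b rest hc ih => simp only [pvPassB, if_neg hc]; simp at ih ⊢; omega
  induction s using pvPassB.induct with
  | case1 => simp [pvPassB] at h
  | case2 c => simp [pvPassB] at h
  | case3 a b rest hc ih =>
    have h2 := hle rest
    simp only [pvPassB, if_pos hc]
    simp
    omega
  | case4 a b rest hc ih =>
    simp only [pvPassB, if_neg hc] at h ⊢
    have h3 := ih (by simpa using h)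
    simp only [List.length_cons] at h3 ⊢
    omega

-- B's outer `while True` loop
def pvReduceB (s : List Char) : List Char :=
  if h : (pvPassB s).2 = true then pvReduceB (pvPassB s).1 else s
termination_by s.length
decreasing_by exact pvPassB_lt s h

def combine_with_one_removed_alt (target : String) (type : String) : String :=
  let t := PySem.Str.lower type
  let s := target.toList.filter (fun c => PySem.Str.lower (pvSgl c) != t)
  String.ofList (pvReduceB s)


-- ===== PRECONDITION & SPEC =====
def Spec_combine_with_one_removed (target : String) (type : String) (out : String) : Prop := out = combine_with_one_removed_alt target type
instance (target : String) (type : String) (out : String) : Decidable (Spec_combine_with_one_removed target type out) := by unfold Spec_combine_with_one_removed; infer_instance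

-- ===== CLAIM (what is proved, stated in full; the proofs are below) =====
def Claim_equal_combine_with_one_removed : Prop := ∀ (target : String) (type : String), Dom_combine_with_one_removed target type → Spec_combine_with_one_removed target type (combine_with_one_removed target type)

-- ===== LEMMAS AND PROOFS =====

-- abstract single-pass stack reduction (stack kept top-first); both ports are shown to
-- compute  String.ofList (pvSred (filtered characters))
def pvStep (st : List Char) (c : Char) : List Char :=
  match st with
  | [] => [c]
  | h :: t => if pvComb h c then t else c :: h :: t

def pvRed (st : List Char) (l : List Char) : List Char := l.foldl pvStep st

def pvSred (l : List Char) : List Char := (pvRed [] l).reverse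

def pvOk (st : List Char) : Prop := List.IsChain (fun x y => pvComb x y = false) st

def pvKeep (type : String) (c : Char) : Bool := PySem.Str.lower (pvSgl c) != PySem.Str.lower type

lemma pvComb_iff (a b : Char) :
    pvComb a b = true ↔ a ≠ b ∧ PySem.Chars.lowerChar a = PySem.Chars.lowerChar b := by
  simp [pvComb, PySem.Chars.lower]

lemma pvLowerChar_toNat (c : Char) :
    (PySem.Chars.lowerChar c).toNat = if 65 ≤ c.toNat ∧ c.toNat ≤ 90 then c.toNat + 32 else c.toNat := by
  have hiff : PySem.Chars.isupper c = true ↔ (65 ≤ c.toNat ∧ c.toNat ≤ 90) := by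
    simp [PySem.Chars.isupper, Char.le_def]
    exact Iff.rfl
  unfold PySem.Chars.lowerChar
  by_cases hu : PySem.Chars.isupper c = true
  · rw [if_pos hu, if_pos (hiff.mp hu)]
    rw [Char.toNat_ofNat]
    rw [if_pos]
    exact Or.inl (by have := (hiff.mp hu).2; omega)
  · rw [if_neg hu, if_neg (fun h => hu (hiff.mpr h))]

lemma pvChar_eq_of_toNat (a b : Char) (h : a.toNat = b.toNat) : a = b :=
  Char.ext (UInt32.toNat_inj.mp h)

lemma pvComb_symm (a b : Char) : pvComb a b = pvComb b a := by
  rw [Bool.eq_iff_iff, pvComb_iff, pvComb_iff]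
  constructor
  · rintro ⟨x, y⟩; exact ⟨x.symm, y.symm⟩
  · rintro ⟨x, y⟩; exact ⟨x.symm, y.symm⟩

lemma pvComb_right_unique {h a b : Char} (h1 : pvComb h a = true) (h2 : pvComb a b = true) : h = b := by
  obtain ⟨hne1, hl1⟩ := (pvComb_iff h a).mp h1
  obtain ⟨hne2, hl2⟩ := (pvComb_iff a b).mp h2
  apply pvChar_eq_of_toNat
  have e1 : (PySem.Chars.lowerChar h).toNat = (PySem.Chars.lowerChar a).toNat := by rw [hl1]
  have e2 : (PySem.Chars.lowerChar a).toNat = (PySem.Chars.lowerChar b).toNat := by rw [hl2]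
  have nha : h.toNat ≠ a.toNat := fun hh => hne1 (pvChar_eq_of_toNat _ _ hh)
  have nab : a.toNat ≠ b.toNat := fun hh => hne2 (pvChar_eq_of_toNat _ _ hh)
  rw [pvLowerChar_toNat, pvLowerChar_toNat] at e1 e2
  split_ifs at e1 e2 <;> omega

lemma pvStep_cons (h1 : Char) (t : List Char) (c : Char) :
    pvStep (h1 :: t) c = if pvComb h1 c then t else c :: h1 :: t := rfl

lemma pvStep_nil (c : Char) : pvStep [] c = [c] := rfl

lemma pvStep_ok {st : List Char} (h : pvOk st) (c : Char) : pvOk (pvStep st c) := by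
  match st with
  | [] => simp [pvOk, pvStep_nil]
  | h1 :: t =>
    rw [pvStep_cons]
    by_cases hc : pvComb h1 c = true
    · rw [if_pos hc]; exact h.tail
    · rw [if_neg hc]
      exact List.isChain_cons_cons.mpr ⟨by rw [pvComb_symm]; simpa using hc, h⟩

lemma pvStep_step {st : List Char} {a b : Char} (hok : pvOk st) (hab : pvComb a b = true) :
    pvStep (pvStep st a) b = st := by
  match st with
  | [] =>
    show pvStep [a] b = []
    rw [pvStep_cons, if_pos hab]
  | h1 :: t =>
    by_cases hc : pvComb h1 a = true
    · have hb : h1 = b := pvComb_right_unique hc hab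
      show pvStep (pvStep (h1 :: t) a) b = h1 :: t
      rw [pvStep_cons, if_pos hc]
      subst hb
      match t with
      | [] => rfl
      | h2 :: t2 =>
        have hf : pvComb h1 h2 = false := List.isChain_cons_cons.mp hok |>.1
        rw [pvStep_cons, pvComb_symm h2 h1, hf]
        simp
    · show pvStep (pvStep (h1 :: t) a) b = h1 :: t
      rw [pvStep_cons, if_neg hc, pvStep_cons, if_pos hab]

lemma pvRed_ok {st : List Char} (h : pvOk st) (l : List Char) : pvOk (pvRed st l) := by
  induction l generalizing st with
  | nil => exact h
  | cons c l ih => exact ih (pvStep_ok h c)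

lemma pvRed_pair {st : List Char} (hok : pvOk st) {a b : Char} (hab : pvComb a b = true) (v : List Char) :
    pvRed st (a :: b :: v) = pvRed st v := by
  show pvRed (pvStep (pvStep st a) b) v = pvRed st v
  rw [pvStep_step hok hab]

lemma pvRed_len (l : List Char) (st : List Char) : (pvRed st l).length ≤ st.length + l.length := by
  induction l generalizing st with
  | nil => simp [pvRed]
  | cons c l ih =>
    have h1 := ih (pvStep st c)
    have h2 : (pvStep st c).length ≤ st.length + 1 := by
      match st with
      | [] => simp [pvStep_nil]
      | h :: t => rw [pvStep_cons]; split <;> (simp; try omega)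
    show (pvRed (pvStep st c) l).length ≤ st.length + (l.length + 1)
    omega

lemma pvRed_mem {c : Char} (l : List Char) (st : List Char) (h : c ∈ pvRed st l) : c ∈ st ∨ c ∈ l := by
  induction l generalizing st with
  | nil => exact Or.inl h
  | cons d l ih =>
    rcases ih (pvStep st d) h with hm | hm
    · match st, hm with
      | [], hm =>
        rw [pvStep_nil] at hm; simp at hm; exact Or.inr (by simp [hm])
      | h1 :: t, hm =>
        rw [pvStep_cons] at hm
        by_cases hc : pvComb h1 d = true
        · rw [if_pos hc] at hm; exact Or.inl (List.mem_cons_of_mem _ hm)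
        · rw [if_neg hc] at hm
          rcases List.mem_cons.mp hm with rfl | hm
          · exact Or.inr (by simp)
          · exact Or.inl hm
    · exact Or.inr (List.mem_cons_of_mem _ hm)

lemma pvRed_of_chain (l : List Char) (st : List Char)
    (h : List.IsChain (fun x y => pvComb x y = false) (st.reverse ++ l)) :
    pvRed st l = l.reverse ++ st := by
  induction l generalizing st with
  | nil => simp [pvRed]
  | cons c l ih =>
    have hstep : pvStep st c = c :: st := by
      match st with
      | [] => rfl
      | h1 :: t =>
        have hlast : pvComb h1 c = false := by
          have h2 := (List.isChain_append.mp h).2.2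
          apply h2 h1 _ c (by simp)
          simp
        rw [pvStep_cons, hlast]
        simp
    show pvRed (pvStep st c) l = (c :: l).reverse ++ st
    rw [hstep]
    have : (c :: st).reverse ++ l = st.reverse ++ (c :: l) := by simp
    rw [ih (c :: st) (by rw [this]; exact h)]
    simp

lemma pvSred_of_chain {l : List Char} (h : List.IsChain (fun x y => pvComb x y = false) l) :
    pvSred l = l := by
  unfold pvSred
  rw [pvRed_of_chain l [] (by simpa using h)]
  simp

lemma pvSred_reduced (l : List Char) : List.IsChain (fun x y => pvComb x y = false) (pvSred l) := by
  have := pvRed_ok (st := []) (by simp [pvOk]) l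
  unfold pvSred
  rw [List.isChain_reverse]
  unfold pvOk at this
  exact this.imp (fun {a b} hh => by rw [pvComb_symm]; exact hh)

lemma pvNotChain_decomp (l : List Char)
    (h : ¬ List.IsChain (fun x y => pvComb x y = false) l) :
    ∃ u a b v, l = u ++ a :: b :: v ∧ pvComb a b = true := by
  induction l with
  | nil => exact absurd (by simp) h
  | cons a t ih =>
    match t with
    | [] => exact absurd (by simp) h
    | b :: t2 =>
      by_cases hab : pvComb a b = true
      · exact ⟨[], a, b, t2, by simp, hab⟩
      · have : ¬ List.IsChain (fun x y => pvComb x y = false) (b :: t2) := by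
          intro hc
          exact h (List.isChain_cons_cons.mpr ⟨by simpa using hab, hc⟩)
        obtain ⟨u, x, y, v, heq, hxy⟩ := ih this
        exact ⟨a :: u, x, y, v, by simp [heq], hxy⟩

lemma pvSred_len (l : List Char) : (pvSred l).length ≤ l.length := by
  have := pvRed_len l []
  simpa [pvSred] using this

lemma pvSred_eq_of_length (l : List Char) (h : (pvSred l).length = l.length) : pvSred l = l := by
  by_cases hc : List.IsChain (fun x y => pvComb x y = false) l
  · exact pvSred_of_chain hc
  · obtain ⟨u, a, b, v, rfl, hab⟩ := pvNotChain_decomp l hc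
    have heq : pvRed [] (u ++ a :: b :: v) = pvRed [] (u ++ v) := by
      unfold pvRed
      rw [List.foldl_append, List.foldl_append]
      exact pvRed_pair (pvRed_ok (by simp [pvOk]) u) hab v
    have hlen : (pvSred (u ++ a :: b :: v)).length ≤ (u ++ v).length := by
      unfold pvSred
      rw [heq]
      simpa [pvSred] using pvRed_len (u ++ v) []
    simp at hlen h
    omega

lemma pvSred_mem {c : Char} (l : List Char) (h : c ∈ pvSred l) : c ∈ l := by
  have := pvRed_mem l [] (by simpa [pvSred] using h)
  simpa using this

lemma pvSred_idem (l : List Char) : pvSred (pvSred l) = pvSred l :=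
  pvSred_of_chain (pvSred_reduced l)

lemma pvAreComb_sgl (a b : Char) : are_combineable (pvSgl a) (pvSgl b) = pvComb a b := by
  unfold are_combineable pvComb
  rw [Bool.eq_iff_iff]
  simp only [Bool.and_eq_true, beq_iff_eq, bne_iff_ne, ne_eq]
  constructor
  · rintro ⟨h1, h2⟩
    refine ⟨fun hh => h2 (by rw [hh]), ?_⟩
    have := congrArg String.toList h1
    simpa [PySem.Str.toList_lower, pvSgl] using this
  · rintro ⟨h1, h2⟩
    refine ⟨?_, fun hh => h1 (by
      have := congrArg String.toList hh
      simpa [pvSgl] using this)⟩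
    apply String.toList_inj.mp
    simpa [PySem.Str.toList_lower, pvSgl] using h2

lemma pvAreComb_empty (c : Char) : are_combineable "" (pvSgl c) = false := by
  unfold are_combineable
  simp only [Bool.and_eq_false_iff]
  left
  simp only [beq_eq_false_iff_ne, ne_eq]
  intro hh
  have := congrArg String.toList hh
  simp [PySem.Str.toList_lower, pvSgl, PySem.Chars.lower] at this

lemma pvFoldA_eq (type : String) (l : List Char) (st : List Char) (hok : pvOk st) :
    List.foldl (pvAStep type) ("" :: (st.reverse.map pvSgl)) l
      = "" :: ((pvRed st (l.filter (pvKeep type))).reverse.map pvSgl) := by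
  induction l generalizing st with
  | nil => rfl
  | cons c l ih =>
    by_cases hk : pvKeep type c = true
    · have hskip : (PySem.Str.lower (pvSgl c) == PySem.Str.lower type) = false := by
        simpa [pvKeep] using hk
      have hstep : pvAStep type ("" :: (st.reverse.map pvSgl)) c
          = "" :: ((pvStep st c).reverse.map pvSgl) := by
        unfold pvAStep
        rw [hskip]
        simp only [Bool.false_eq_true, if_false]
        match st with
        | [] =>
          rw [pvStep_nil]
          simp only [List.reverse_nil, List.map_nil]
          have h9 : PySem.List.pyGetD ([""] : List String) (-1) "" = "" := by decide
          rw [h9, pvAreComb_empty]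
          simp
        | h1 :: t =>
          have hlast : PySem.List.pyGetD ("" :: ((h1 :: t).reverse.map pvSgl)) (-1) "" = pvSgl h1 := by
            have : ("" :: ((h1 :: t).reverse.map pvSgl)) = ("" :: (t.reverse.map pvSgl)) ++ [pvSgl h1] := by
              simp
            rw [this, PySem.List.pyGetD_neg_one_append_singleton]
          rw [hlast, pvAreComb_sgl, pvStep_cons]
          by_cases hc : pvComb h1 c = true
          · rw [if_pos hc, if_pos hc]
            have : ("" :: ((h1 :: t).reverse.map pvSgl)).dropLast = "" :: (t.reverse.map pvSgl) := by
              have h2 : ("" :: ((h1 :: t).reverse.map pvSgl)) = ("" :: (t.reverse.map pvSgl)) ++ [pvSgl h1] := by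
                simp
              rw [h2, List.dropLast_concat]
            rw [this]
          · rw [if_neg hc, if_neg hc]
            simp
      rw [List.foldl_cons, hstep, ih (pvStep st c) (pvStep_ok hok c),
        List.filter_cons_of_pos hk]
      show _ = "" :: ((pvRed (pvStep st c) (l.filter (pvKeep type))).reverse.map pvSgl)
      rfl
    · have hskip : (PySem.Str.lower (pvSgl c) == PySem.Str.lower type) = true := by
        simpa [pvKeep] using hk
      have hstep : pvAStep type ("" :: (st.reverse.map pvSgl)) c = "" :: (st.reverse.map pvSgl) := by
        unfold pvAStep
        rw [hskip]
        simp
      rw [List.foldl_cons, hstep, ih st hok, List.filter_cons_of_neg (by simpa using hk)]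

lemma pvJoin_sgl (parts : List Char) :
    PySem.Str.join "" ("" :: (parts.map pvSgl)) = String.ofList parts := by
  apply String.toList_inj.mp
  rw [PySem.Str.toList_join]
  have hjoin : ∀ (L : List (List Char)), PySem.Chars.join [] L = L.flatten := by
    intro L
    induction L with
    | nil => rfl
    | cons h t ih => cases t <;> simp_all [PySem.Chars.join, List.intercalate, List.intersperse]
  simp only [String.toList_empty, hjoin, List.map_cons, List.map_map]
  have : ∀ (cs : List Char), (cs.map (String.toList ∘ pvSgl)).flatten = cs := by
    intro cs
    induction cs with
    | nil => rfl
    | cons a t ih => simp [pvSgl, ih]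
  simp [this]

lemma pvPassA_eq (target type : String) :
    pvPassA target type = String.ofList (pvSred (target.toList.filter (pvKeep type))) := by
  unfold pvPassA
  have h0 := pvFoldA_eq type target.toList [] (by simp [pvOk])
  simp only [List.reverse_nil, List.map_nil] at h0
  rw [h0, pvJoin_sgl]
  rfl

set_option maxHeartbeats 800000 in
lemma pvA_eq (target type : String) :
    combine_with_one_removed target type
      = String.ofList (pvSred (target.toList.filter (pvKeep type))) := by
  induction target using combine_with_one_removed.induct (type := type) with
  | case1 target nw hc =>
    rw [combine_with_one_removed]
    show (if (PySem.Str.len (pvPassA target type) == PySem.Str.len target) = true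
        then target else combine_with_one_removed (pvPassA target type) type) = _
    set f := target.toList.filter (pvKeep type) with hf
    have hpa : pvPassA target type = String.ofList (pvSred f) := pvPassA_eq target type
    rw [if_pos hc]
    have hlen : (pvSred f).length = target.toList.length := by
      have h0 := congrArg (fun s => s.toList.length) hpa
      simp only [String.toList_ofList] at h0
      have h1 : (pvPassA target type).toList.length = target.toList.length := by
        simpa [PySem.Str.len] using hc
      omega
    have h1 : (pvSred f).length ≤ f.length := pvSred_len f
    have h2 : f.length ≤ target.toList.length := List.length_filter_le _ _
    have hfl : f.length = target.toList.length := by omega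
    have hfeq : f = target.toList := by
      rw [hf] at hfl ⊢
      exact List.filter_eq_self.mpr (List.length_filter_eq_length_iff.mp hfl)
    rw [hfeq] at hlen ⊢
    rw [pvSred_eq_of_length _ hlen, String.ofList_toList]
  | case2 target nw hc ih =>
    rw [combine_with_one_removed]
    show (if (PySem.Str.len (pvPassA target type) == PySem.Str.len target) = true
        then target else combine_with_one_removed (pvPassA target type) type) = _
    set f := target.toList.filter (pvKeep type) with hf
    have hpa : pvPassA target type = String.ofList (pvSred f) := pvPassA_eq target type
    rw [if_neg hc]
    have ihh : combine_with_one_removed (pvPassA target type) type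
        = String.ofList (pvSred ((pvPassA target type).toList.filter (pvKeep type))) := ih
    rw [ihh, hpa]
    congr 1
    rw [String.toList_ofList]
    have hfilter : (pvSred f).filter (pvKeep type) = pvSred f := by
      apply List.filter_eq_self.mpr
      intro a ha
      exact List.of_mem_filter (pvSred_mem f ha)
    rw [hfilter, pvSred_idem]

lemma pvPassB_chain (s : List Char) (h : (pvPassB s).2 = false) :
    List.IsChain (fun x y => pvComb x y = false) s := by
  induction s using pvPassB.induct with
  | case1 => simp
  | case2 c => simp
  | case3 a b rest hc ih => simp [pvPassB, hc] at h
  | case4 a b rest hc ih =>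
    simp only [pvPassB, if_neg hc] at h
    exact List.isChain_cons_cons.mpr ⟨by simpa using hc, ih h⟩

lemma pvPassB_sred (s : List Char) : ∀ (st : List Char), pvOk st →
    pvRed st (pvPassB s).1 = pvRed st s := by
  induction s using pvPassB.induct with
  | case1 => intro st _; rfl
  | case2 c => intro st _; rfl
  | case3 a b rest hc ih =>
    intro st hok
    simp only [pvPassB, if_pos hc]
    rw [ih st hok, pvRed_pair hok hc]
  | case4 a b rest hc ih =>
    intro st hok
    simp only [pvPassB, if_neg hc]
    show pvRed (pvStep st a) (pvPassB (b :: rest)).1 = pvRed st (a :: b :: rest)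
    rw [ih (pvStep st a) (pvStep_ok hok a)]
    rfl

lemma pvReduceB_eq (s : List Char) : pvReduceB s = pvSred s := by
  induction s using pvReduceB.induct with
  | case1 s hch ih =>
    rw [pvReduceB, dif_pos hch, ih]
    unfold pvSred
    rw [pvPassB_sred s [] (by simp [pvOk])]
  | case2 s hch =>
    rw [pvReduceB, dif_neg hch]
    exact (pvSred_of_chain (pvPassB_chain s (by simpa using hch))).symm

lemma pvB_eq (target type : String) :
    combine_with_one_removed_alt target type
      = String.ofList (pvSred (target.toList.filter (pvKeep type))) := by
  show String.ofList (pvReduceB (target.toList.filter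
      (fun c => PySem.Str.lower (pvSgl c) != PySem.Str.lower type))) = _
  rw [pvReduceB_eq]
  rfl


-- ===== VERDICT (by name: the statement is the Claim_ definition above) =====
theorem combine_with_one_removed_spec : Claim_equal_combine_with_one_removed := by
  intro target type _
  unfold Spec_combine_with_one_removed
  rw [pvA_eq, pvB_eq]
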